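-- pv_equiv track=rewrite | github.com/merenlab/anvio | anvio/homogeneityindex.py | convert_sequences_to_binary_array
-- ===== SOURCE A (Python) =====
-- def convert_sequences_to_binary_array(gene_sequences, bygene = False):
--     """This function takes an array of aligned gene sequences of a gene cluster and converts it to a binary array.
--        Gaps are represented by 1s. For efficiency purposes, arrays are stored as single-dimensional arrays of binary numbers
--        and can be ordered either by residue (every array entry represents a residue position in all genes) or by gene (every
--        array entry represents a gene)."""
--     num_genes = len(gene_sequences)
--     num_residues = len(gene_sequences[0])
--     if not bygene: #array will be ordered by residue column
--         array = [0] * num_residues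
--         for gene in range(num_genes):
--             for residue in range(num_residues):
--                 if gene_sequences[gene][residue] == "-":
--                     array[residue] = ((array[residue]) << 1) + 1
--                 else:
--                     array[residue] = ((array[residue]) << 1) + 0
--     else: #array will be ordered by gene, rather than by residue column
--         array = [0] * num_genes
--         for residue in range(num_residues):
--             for gene in range(num_genes):
--                 if gene_sequences[gene][residue] == "-":
--                     array[gene] = ((array[gene]) << 1) + 1
--                 else:
--                     array[gene] = ((array[gene]) << 1) + 0
--
--     return array
-- ===== SOURCE B (Python) =====
-- def convert_sequences_to_binary_array(gene_sequences, bygene = False):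
--     """Gap-bitmask arrays via translate-to-binary-string then int(s, 2) parsing."""
--     num_residues = len(gene_sequences[0])
--     bits = lambda ch: '1' if ch == '-' else '0'
--     if bygene:
--         return [int(''.join(map(bits, seq[:num_residues])), 2) if num_residues else 0
--                 for seq in gene_sequences]
--     return [int(''.join(bits(seq[j]) for seq in gene_sequences), 2)
--             for j in range(num_residues)]
-- ===== Notes on version B (the rewrite author's own statement) =====
-- stated objective: idiomatic
-- what changed: Replaces the nested shift-and-add accumulator loops with a translate-then-parse decomposition: each output entry is produced independently as int() of a binary string built in one pass (per gene, or per residue column), instead of repeatedly updating a shared array across the transposed loop order.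
import Mathlib
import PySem

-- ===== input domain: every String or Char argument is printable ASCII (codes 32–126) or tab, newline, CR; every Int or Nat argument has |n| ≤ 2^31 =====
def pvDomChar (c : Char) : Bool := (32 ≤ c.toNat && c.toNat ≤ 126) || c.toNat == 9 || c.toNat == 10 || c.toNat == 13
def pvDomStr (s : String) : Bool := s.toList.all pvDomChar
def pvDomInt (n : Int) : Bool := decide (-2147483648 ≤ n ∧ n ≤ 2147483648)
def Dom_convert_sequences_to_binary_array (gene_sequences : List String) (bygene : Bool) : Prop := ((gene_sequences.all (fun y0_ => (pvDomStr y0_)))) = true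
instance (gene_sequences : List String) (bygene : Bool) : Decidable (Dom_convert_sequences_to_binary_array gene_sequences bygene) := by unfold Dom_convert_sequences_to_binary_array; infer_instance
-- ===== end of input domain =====

-- B replaces A's transposed shift-and-add accumulator loops over a shared array by building each
-- output entry independently: translate chars to '0'/'1' bits and parse the binary string (idiomatic).

-- ===== PORT A =====
-- literal transliteration; sequence/char indexing is totalized with getD (out-of-range raises in
-- Python and is excluded by Pre_); `x << 1` is written `x * 2` (the accumulators are nonnegative).
def convert_sequences_to_binary_array (gene_sequences : List String) (bygene : Bool) : List Int :=
  let seqs := gene_sequences.map String.toList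
  let num_genes := seqs.length
  let num_residues := (seqs.getD 0 []).length
  if !bygene then
    (List.range num_genes).foldl (fun arr gene =>
      (List.range num_residues).foldl (fun a residue =>
        a.set residue ((a.getD residue 0) * 2 +
          (if (seqs.getD gene []).getD residue ' ' = '-' then 1 else 0))) arr)
      (List.replicate num_residues (0 : Int))
  else
    (List.range num_residues).foldl (fun arr residue =>
      (List.range num_genes).foldl (fun a gene =>
        a.set gene ((a.getD gene 0) * 2 +
          (if (seqs.getD gene []).getD residue ' ' = '-' then 1 else 0))) arr)
      (List.replicate num_genes (0 : Int))

-- ===== PORT B =====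
-- bits : '-' ↦ '1', anything else ↦ '0'
def pvTransBit (c : Char) : Char := if c = '-' then '1' else '0'
-- int(s, 2) on a '0'/'1' string
def pvParseBin (l : List Char) : Int := l.foldl (fun a c => a * 2 + (if c = '1' then 1 else 0)) 0

def convert_sequences_to_binary_array_alt (gene_sequences : List String) (bygene : Bool) : List Int :=
  let num_residues := (gene_sequences.headD "").toList.length
  if bygene then
    gene_sequences.map (fun seq =>
      if num_residues = 0 then 0
      else pvParseBin ((seq.toList.take num_residues).map pvTransBit))
  else
    (List.range num_residues).map (fun j =>
      pvParseBin (gene_sequences.map (fun s => pvTransBit (s.toList.getD j ' '))))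

-- ===== PRECONDITION & SPEC =====
-- Pre_ = exactly where Python A returns: a nonempty list (A indexes gene_sequences[0]) in which
-- every sequence has at least len(gene_sequences[0]) characters (shorter ones raise IndexError).
def Pre_convert_sequences_to_binary_array (gene_sequences : List String) (bygene : Bool) : Prop :=
  gene_sequences ≠ [] ∧
  ∀ s ∈ gene_sequences, (gene_sequences.headD "").toList.length ≤ s.toList.length
instance (gene_sequences : List String) (bygene : Bool) : Decidable (Pre_convert_sequences_to_binary_array gene_sequences bygene) := by unfold Pre_convert_sequences_to_binary_array; infer_instance

def pvWitness_convert_sequences_to_binary_array : List String × Bool := (["-a", "b-"], false)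

def Spec_convert_sequences_to_binary_array (gene_sequences : List String) (bygene : Bool) (out : List Int) : Prop := out = convert_sequences_to_binary_array_alt gene_sequences bygene
instance (gene_sequences : List String) (bygene : Bool) (out : List Int) : Decidable (Spec_convert_sequences_to_binary_array gene_sequences bygene out) := by unfold Spec_convert_sequences_to_binary_array; infer_instance

-- ===== CLAIM (what is proved, stated in full; the proofs are below) =====
def Claim_equal_convert_sequences_to_binary_array : Prop := ∀ (gene_sequences : List String) (bygene : Bool), Dom_convert_sequences_to_binary_array gene_sequences bygene → Pre_convert_sequences_to_binary_array gene_sequences bygene → Spec_convert_sequences_to_binary_array gene_sequences bygene (convert_sequences_to_binary_array gene_sequences bygene)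

-- ===== LEMMAS AND PROOFS =====

-- one inner pass of A: setting every position p < k of the array in order is a mapIdx
theorem pvFoldlSet (f : Nat → Int → Int) :
    ∀ (k : Nat) (arr : List Int), k ≤ arr.length →
    (List.range k).foldl (fun a p => a.set p (f p (a.getD p 0))) arr
      = arr.mapIdx (fun p v => if p < k then f p v else v) := by
  intro k
  induction k with
  | zero =>
    intro arr _
    simp [List.range_zero]
    apply List.ext_getElem
    · simp
    · intro i h1 h2; simp
  | succ k ih =>
    intro arr hk
    rw [List.range_succ, List.foldl_append, ih arr (by omega)]
    apply List.ext_getElem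
    · simp
    · intro i h1 h2
      simp only [List.foldl_cons, List.foldl_nil]
      rw [List.getElem_set]
      have hlen : (arr.mapIdx (fun p v => if p < k then f p v else v)).length = arr.length := by simp
      by_cases hik : k = i
      · subst hik
        simp [List.getElem_mapIdx, List.getElem?_eq_getElem (show k < arr.length by omega)]
      · rw [if_neg hik]
        simp only [List.getElem_mapIdx] at *
        have : i < arr.length := by simp at h2; omega
        split_ifs with h3 h4 <;> first | rfl | omega

-- the whole of one of A's branches: folding inner passes over the outer index list
-- leaves each array entry holding its own left fold
theorem pvOuterFold (β : Nat → Nat → Int) (n : Nat) :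
    ∀ (gl : List Nat) (arr : List Int), arr.length = n →
    gl.foldl (fun arr g => (List.range n).foldl (fun a p =>
        a.set p ((a.getD p 0) * 2 + β g p)) arr) arr
      = arr.mapIdx (fun p v => gl.foldl (fun acc g => acc * 2 + β g p) v) := by
  intro gl
  induction gl with
  | nil =>
    intro arr _
    apply List.ext_getElem
    · simp
    · intro i h1 h2; simp
  | cons g gl ih =>
    intro arr hlen
    simp only [List.foldl_cons]
    have h1 : (List.range n).foldl (fun a p => a.set p ((a.getD p 0) * 2 + β g p)) arr
        = arr.mapIdx (fun p v => if p < n then v * 2 + β g p else v) := by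
      have := pvFoldlSet (fun p v => v * 2 + β g p) n arr (by omega)
      exact this
    rw [h1, ih _ (by simp [hlen])]
    apply List.ext_getElem
    · simp
    · intro i h1' h2'
      simp only [List.getElem_mapIdx]
      have : i < n := by simp at h1'; omega
      rw [if_pos this]

theorem pvMapIdxReplicate (f : Nat → Int → Int) (n : Nat) :
    (List.replicate n (0 : Int)).mapIdx f = (List.range n).map (fun r => f r 0) := by
  apply List.ext_getElem
  · simp
  · intro i h1 h2
    simp [List.getElem_mapIdx, List.getElem_replicate]

theorem pvRangeFoldGetD {α : Type} (l : List α) (d : α) (h : Int → α → Int) (init : Int) :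
    (List.range l.length).foldl (fun a g => h a (l.getD g d)) init = l.foldl h init := by
  have : (List.range l.length).map (fun g => l.getD g d) = l := by
    apply List.ext_getElem
    · simp
    · intro i h1 h2
      simp [List.getD_eq_getElem?_getD, List.getElem?_eq_getElem h2]
  conv_rhs => rw [← this]
  rw [List.foldl_map]

theorem pvRangeMapGetD {α β : Type} (l : List α) (d : α) (F : α → β) :
    (List.range l.length).map (fun g => F (l.getD g d)) = l.map F := by
  apply List.ext_getElem
  · simp
  · intro i h1 h2
    simp [List.getD_eq_getElem?_getD, List.getElem?_eq_getElem (by simpa using h2)]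

theorem pvRangeMapTake (l : List Char) (d : Char) (k : Nat) (hk : k ≤ l.length) :
    (List.range k).map (fun r => l.getD r d) = l.take k := by
  apply List.ext_getElem
  · simp; omega
  · intro i h1 h2
    have hi : i < k := by simpa using h1
    simp [List.getD_eq_getElem?_getD, List.getElem?_eq_getElem (by omega : i < l.length),
      List.getElem_take]

theorem pvTransBitEq (c : Char) : (if pvTransBit c = '1' then (1 : Int) else 0)
    = (if c = '-' then 1 else 0) := by
  unfold pvTransBit
  by_cases h : c = '-' <;> simp [h]

theorem pvHeadEq (gs : List String) :
    ((gs.map String.toList).getD 0 []).length = (gs.headD "").toList.length := by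
  cases gs <;> simp

-- one gene of B's bygene branch against the residue-fold A produces for that gene
theorem pvGeneCase (cl : List Char) (L : Nat) (h : L ≤ cl.length) :
    (List.range L).foldl (fun acc r => acc * 2 + (if cl.getD r ' ' = '-' then 1 else 0)) 0
      = if L = 0 then 0 else pvParseBin ((cl.take L).map pvTransBit) := by
  by_cases h0 : L = 0
  · subst h0; simp
  · rw [if_neg h0, ← pvRangeMapTake cl ' ' L h]
    unfold pvParseBin
    rw [List.foldl_map, List.foldl_map]
    simp only [pvTransBitEq]

-- ===== VERDICT (by name: the statement is the Claim_ definition above) =====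
theorem convert_sequences_to_binary_array_spec : Claim_equal_convert_sequences_to_binary_array := by
  intro gs bygene _ hpre
  obtain ⟨hne, hlen⟩ := hpre
  unfold Spec_convert_sequences_to_binary_array
  unfold convert_sequences_to_binary_array convert_sequences_to_binary_array_alt
  simp only []
  set seqs := gs.map String.toList with hseqs
  have hn : (seqs.getD 0 []).length = (gs.headD "").toList.length := pvHeadEq gs
  cases bygene with
  | false =>
    simp only [Bool.not_false, Bool.false_eq_true, reduceIte]
    rw [pvOuterFold (fun g p => if (seqs.getD g []).getD p ' ' = '-' then 1 else 0)
        (seqs.getD 0 []).length (List.range seqs.length)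
        (List.replicate (seqs.getD 0 []).length 0) (by simp)]
    rw [pvMapIdxReplicate, hn]
    apply List.map_congr_left
    intro j hj
    rw [pvRangeFoldGetD seqs [] (fun a cl => a * 2 + (if cl.getD j ' ' = '-' then 1 else 0)) 0]
    unfold pvParseBin
    rw [hseqs, List.foldl_map, List.foldl_map]
    simp only [pvTransBitEq]
  | true =>
    simp only [Bool.not_true, reduceIte]
    rw [pvOuterFold (fun r g => if (seqs.getD g []).getD r ' ' = '-' then 1 else 0)
        seqs.length (List.range (seqs.getD 0 []).length)
        (List.replicate seqs.length 0) (by simp)]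
    rw [pvMapIdxReplicate]
    rw [pvRangeMapGetD seqs []
      (fun cl => (List.range (seqs.getD 0 []).length).foldl
        (fun acc r => acc * 2 + (if cl.getD r ' ' = '-' then 1 else 0)) 0)]
    rw [hseqs, List.map_map]
    apply List.map_congr_left
    intro s hs
    have hsl : (gs.headD "").toList.length ≤ s.toList.length := hlen s hs
    simp only [Function.comp_apply]
    rw [show ((List.map String.toList gs).getD 0 []).length
        = (gs.headD "").toList.length from pvHeadEq gs]
    exact pvGeneCase s.toList (gs.headD "").toList.length hsl
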